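-- pv_equiv track=rewrite | github.com/MrBrantCode/unitest_baseline | mut_generate/mist_train_cf/cf_44728/solution.py | map_and_filter
-- ===== SOURCE A (Python) =====
-- def map_and_filter(input_list):
--     """
--     This function filters the input list and returns a list of elements
--     which are either prime numbers or even.
--     """
--     def is_prime_or_even(num):
--         """
--         Helper function checks if the number is prime or even.
--         """
--         # check if the number is even
--         if num % 2 == 0:
--             return True
--         # check if the number is a prime
--         if num > 1:
--             for i in range(2, num):
--                 if (num % i) == 0:
--                     return False
--             else:
--                 return True
--         else:
--             return False
--
--     return [item for item in input_list if isinstance(item, int) and is_prime_or_even(item)]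
-- ===== SOURCE B (Python) =====
-- def map_and_filter(input_list):
--     """
--     Filters the input list, keeping elements that are integers and are
--     either even or prime.  Primality is tested by odd trial division
--     up to the square root instead of dividing by every smaller number.
--     """
--     def keep(n):
--         if not isinstance(n, int):
--             return False
--         if n % 2 == 0:
--             return True
--         if n < 2:
--             return False
--         d = 3
--         while d * d <= n:
--             if n % d == 0:
--                 return False
--             d += 2
--         return True
--     return [x for x in input_list if keep(x)]
-- ===== Notes on version B (the rewrite author's own statement) =====
-- stated objective: faster
-- what changed: Replaced A's per-element trial division by every i in 2..n-1 with an odd-only trial division up to sqrt(n) (even numbers short-circuit first), keeping one filtering pass.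
import Mathlib
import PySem

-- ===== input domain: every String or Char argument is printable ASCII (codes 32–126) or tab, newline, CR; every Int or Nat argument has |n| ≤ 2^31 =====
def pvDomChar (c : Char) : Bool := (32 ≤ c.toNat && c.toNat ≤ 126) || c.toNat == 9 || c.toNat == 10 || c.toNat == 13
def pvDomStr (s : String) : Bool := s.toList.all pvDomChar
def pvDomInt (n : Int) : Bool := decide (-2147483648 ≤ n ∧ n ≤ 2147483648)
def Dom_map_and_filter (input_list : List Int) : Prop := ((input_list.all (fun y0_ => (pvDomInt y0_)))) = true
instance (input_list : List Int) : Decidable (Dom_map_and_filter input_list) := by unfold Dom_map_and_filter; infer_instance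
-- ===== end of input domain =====

-- B replaces A's per-element trial division by every i in 2..n-1 with odd-only
-- trial division up to sqrt(n) (objective: faster primality test per element).


-- ===== PORT A =====
-- Helper `is_prime_or_even`: the for/else loop over range(2, num) returns False
-- on the first divisor and True if the loop completes; ported as List.all.
def isPrimeOrEven (num : Int) : Bool :=
  if PySem.Int.mod num 2 == 0 then true
  else if num > 1 then
    (PySem.List.pyRange 2 num 1).all (fun i => !(PySem.Int.mod num i == 0))
  else false

def map_and_filter (input_list : List Int) : List Int :=
  input_list.filter (fun item => isPrimeOrEven item)

-- ===== PORT B =====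
-- The `while d * d <= n` loop of Source B, with a fuel bound (the fuel is a
-- termination guard only: it is never exhausted while the loop condition holds).
def bTrialF : Nat → Int → Int → Bool
  | 0, _, _ => true
  | f + 1, n, d =>
    if d * d ≤ n then
      if PySem.Int.mod n d == 0 then false else bTrialF f n (d + 2)
    else true

def bTrial (n : Int) (d : Int) : Bool := bTrialF (n + 2 - d).toNat n d

def bKeep (n : Int) : Bool :=
  if PySem.Int.mod n 2 == 0 then true
  else if n < 2 then false
  else bTrial n 3

def map_and_filter_alt (input_list : List Int) : List Int :=
  input_list.filter (fun x => bKeep x)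

-- ===== PRECONDITION & SPEC =====
def Spec_map_and_filter (input_list : List Int) (out : List Int) : Prop := out = map_and_filter_alt input_list
instance (input_list : List Int) (out : List Int) : Decidable (Spec_map_and_filter input_list out) := by unfold Spec_map_and_filter; infer_instance

-- ===== CLAIM (what is proved, stated in full; the proofs are below) =====
def Claim_equal_map_and_filter : Prop := ∀ (input_list : List Int), Dom_map_and_filter input_list → Spec_map_and_filter input_list (map_and_filter input_list)

-- ===== LEMMAS AND PROOFS =====

-- A's inner loop result, characterised: no divisor in [2, n).
lemma aLoop_iff (n : Int) :
    ((PySem.List.pyRange 2 n 1).all (fun i => !(PySem.Int.mod n i == 0))) = true ↔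
      ∀ i : Int, 2 ≤ i → i < n → ¬ i ∣ n := by
  simp only [List.all_eq_true, PySem.List.mem_pyRange_one]
  constructor
  · intro h i h2 hlt hdvd
    have := h i ⟨h2, hlt⟩
    rw [(PySem.Int.mod_eq_zero_iff_dvd n i).2 hdvd] at this
    simp at this
  · intro h i hi
    have : PySem.Int.mod n i ≠ 0 := fun hz =>
      h i hi.1 hi.2 ((PySem.Int.mod_eq_zero_iff_dvd n i).1 hz)
    simpa using this

-- A's inner loop decides primality of n.toNat for n > 1.
lemma aLoop_prime (n : Int) (hn : 1 < n) :
    ((PySem.List.pyRange 2 n 1).all (fun i => !(PySem.Int.mod n i == 0))) = true ↔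
      Nat.Prime n.toNat := by
  rw [aLoop_iff, Nat.prime_def_lt']
  have hn0 : (0:Int) ≤ n := by omega
  have hcast : ((n.toNat : Int)) = n := Int.toNat_of_nonneg hn0
  constructor
  · intro h
    refine ⟨by omega, ?_⟩
    intro m h2 hlt hdvd
    refine h (m : Int) (by exact_mod_cast h2) (by omega) ?_
    rw [← hcast]
    exact_mod_cast hdvd
  · rintro ⟨-, h⟩ i h2 hlt hdvd
    have hi0 : (0:Int) ≤ i := by omega
    refine h i.toNat (by omega) (by omega) ?_
    have : (i.toNat : Int) ∣ (n.toNat : Int) := by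
      rw [Int.toNat_of_nonneg hi0, hcast]; exact hdvd
    exact_mod_cast this

-- B's while loop, characterised: no divisor d ≥ d0 of the same parity with d*d ≤ n.
lemma bTrialF_iff (n : Int) :
    ∀ (f : Nat) (d0 : Int), (n + 2 - d0) ≤ 2 * (f : Int) → 0 < d0 →
      (bTrialF f n d0 = true ↔ ∀ d : Int, d0 ≤ d → 2 ∣ d - d0 → d * d ≤ n → ¬ d ∣ n) := by
  intro f
  induction f with
  | zero =>
    intro d0 hk hpos
    simp only [bTrialF, true_iff]
    intro d hd _ hsq _
    have h1 : n + 2 ≤ d0 := by omega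
    have : d0 * d0 ≤ d * d := by nlinarith
    nlinarith
  | succ f ih =>
    intro d0 hk hpos
    show (if d0 * d0 ≤ n then
        if PySem.Int.mod n d0 == 0 then false else bTrialF f n (d0 + 2)
      else true) = true ↔ _
    by_cases hle : d0 * d0 ≤ n
    · have hdn : d0 ≤ n := by nlinarith
      by_cases hdvd : PySem.Int.mod n d0 = 0
      · have hd : d0 ∣ n := (PySem.Int.mod_eq_zero_iff_dvd n d0).1 hdvd
        simp only [hle, if_pos, hdvd]
        simp only [beq_self_eq_true, if_true]
        constructor
        · intro h; exact absurd h (by simp)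
        · intro h
          exact absurd hd (h d0 le_rfl ⟨0, by ring⟩ hle)
      · have hmod : (PySem.Int.mod n d0 == 0) = false := by
          simpa using hdvd
        simp only [hle, if_pos, hmod, Bool.false_eq_true, if_false]
        have hrec := ih (d0 + 2) (by omega) (by omega)
        rw [hrec]
        constructor
        · intro h d hd hpar hsq hdv
          rcases eq_or_lt_of_le hd with heq | hlt
          · exact hdvd ((PySem.Int.mod_eq_zero_iff_dvd n d0).2 (heq ▸ hdv))
          · have : d0 + 2 ≤ d := by omega
            exact h d this (by omega) hsq hdv
        · intro h d hd hpar hsq hdv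
          exact h d (by omega) (by omega) hsq hdv
    · simp only [hle, if_neg, not_false_iff]
      constructor
      · intro _ d hd _ hsq hdv
        have : d0 * d0 ≤ d * d := by nlinarith
        omega
      · intro _; trivial

-- B's loop from 3 decides primality of n.toNat for odd n ≥ 3.
lemma bTrial_prime (n : Int) (h3 : 3 ≤ n) (hodd : ¬ (2:Int) ∣ n) :
    bTrial n 3 = true ↔ Nat.Prime n.toNat := by
  rw [show bTrial n 3 = bTrialF (n + 2 - 3).toNat n 3 from rfl,
    bTrialF_iff n (n + 2 - 3).toNat 3 (by omega) (by omega)]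
  have hn0 : (0:Int) ≤ n := by omega
  have hcast : ((n.toNat : Int)) = n := Int.toNat_of_nonneg hn0
  constructor
  · intro h
    by_contra hnp
    have hpos : 0 < n.toNat := by omega
    have hp := Nat.minFac_prime (n := n.toNat) (by omega)
    have hsq := Nat.minFac_sq_le_self hpos hnp
    have hdvd : n.toNat.minFac ∣ n.toNat := Nat.minFac_dvd _
    set p := n.toNat.minFac with hp_def
    have hp2 : 2 ≤ p := hp.two_le
    have hpne2 : p ≠ 2 := by
      intro h2
      apply hodd
      have : (2:ℕ) ∣ n.toNat := h2 ▸ hdvd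
      rw [← hcast]; exact_mod_cast this
    have hp3 : 3 ≤ p := by omega
    have hpodd : ¬ (2:ℕ) ∣ p := fun h2 =>
      (hp.eq_one_or_self_of_dvd 2 h2).elim (by omega) (fun h => hpne2 h.symm)
    have hpodd' : (2:Int) ∣ (p : Int) - 3 := by
      rcases Nat.even_or_odd p with he | ho
      · exact absurd he.two_dvd hpodd
      · rcases ho with ⟨c, hc⟩
        exact ⟨(c : Int) - 1, by push_cast [hc]; ring⟩
    have hdvdZ : (p : Int) ∣ n := by
      rw [← hcast]; exact_mod_cast hdvd
    have hsqZ : (p : Int) * (p : Int) ≤ n := by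
      rw [← hcast]; nlinarith [hsq]
    exact h (p : Int) (by exact_mod_cast hp3) hpodd' hsqZ hdvdZ
  · intro hp d hd hpar hsq hdv
    have hd0 : (0:Int) ≤ d := by omega
    have hdlt : d < n := by nlinarith
    have hdvdN : d.toNat ∣ n.toNat := by
      have : (d.toNat : Int) ∣ (n.toNat : Int) := by
        rw [Int.toNat_of_nonneg hd0, hcast]; exact hdv
      exact_mod_cast this
    exact (Nat.prime_def_lt'.1 hp).2 d.toNat (by omega) (by omega) hdvdN

-- The two keep-predicates agree on every integer.
lemma keep_eq (n : Int) : isPrimeOrEven n = bKeep n := by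
  unfold isPrimeOrEven bKeep
  by_cases he : PySem.Int.mod n 2 = 0
  · have h2 : (2:Int) ∣ n := (PySem.Int.mod_eq_zero_iff_dvd n 2).1 he
    simp [h2]
  · have hmod : (PySem.Int.mod n 2 == 0) = false := by simpa using he
    simp only [hmod, Bool.false_eq_true, if_false]
    have hodd : ¬ (2:Int) ∣ n := fun h => he ((PySem.Int.mod_eq_zero_iff_dvd n 2).2 h)
    by_cases hn : 1 < n
    · have hn2 : ¬ n < 2 := by omega
      have h3 : 3 ≤ n := by
        by_contra hlt
        have : n = 2 := by omega
        exact hodd (this ▸ ⟨1, by ring⟩)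
      simp only [hn, if_pos, hn2, if_false]
      have ha := aLoop_prime n hn
      have hb := bTrial_prime n h3 hodd
      have hiff := ha.trans hb.symm
      cases hA : ((PySem.List.pyRange 2 n 1).all (fun i => !(PySem.Int.mod n i == 0))) <;>
        cases hB : bTrial n 3 <;> simp_all
    · have : n < 2 := by omega
      simp [hn, this]

-- ===== VERDICT (by name: the statement is the Claim_ definition above) =====
theorem map_and_filter_spec : Claim_equal_map_and_filter := by
  intro input_list _
  unfold Spec_map_and_filter map_and_filter map_and_filter_alt
  exact List.filter_congr (fun x _ => keep_eq x)
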